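-- pv_equiv track=rewrite | github.com/makennamartin97/python-algorithms | emotifysentence.py | emotify
-- ===== SOURCE A (Python) =====
-- def emotify(txt):
-- 	face = {
-- 		'smile': ':D', 'grin': ':)', 'sad': ':(', 'mad':':P'
--
-- 	}
-- 	for f in face.keys():
-- 		if f in txt:
-- 			txt = txt.replace(f, face[f])
-- 	return txt
-- ===== SOURCE B (Python) =====
-- def emotify(txt):
--     face = {'smile': ':D', 'grin': ':)', 'sad': ':(', 'mad': ':P'}
--     out = []
--     i = 0
--     n = len(txt)
--     while i < n:
--         for f, e in face.items():
--             if txt.startswith(f, i):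
--                 out.append(e)
--                 i += len(f)
--                 break
--         else:
--             out.append(txt[i])
--             i += 1
--     return ''.join(out)
-- ===== Notes on version B (the rewrite author's own statement) =====
-- stated objective: alternative
-- what changed: A makes four sequential full str.replace passes over the text (one per keyword); B does a single left-to-right scan, at each position trying the four keywords in dict order and emitting the emoticon or the character, building the output once.
import Mathlib
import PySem

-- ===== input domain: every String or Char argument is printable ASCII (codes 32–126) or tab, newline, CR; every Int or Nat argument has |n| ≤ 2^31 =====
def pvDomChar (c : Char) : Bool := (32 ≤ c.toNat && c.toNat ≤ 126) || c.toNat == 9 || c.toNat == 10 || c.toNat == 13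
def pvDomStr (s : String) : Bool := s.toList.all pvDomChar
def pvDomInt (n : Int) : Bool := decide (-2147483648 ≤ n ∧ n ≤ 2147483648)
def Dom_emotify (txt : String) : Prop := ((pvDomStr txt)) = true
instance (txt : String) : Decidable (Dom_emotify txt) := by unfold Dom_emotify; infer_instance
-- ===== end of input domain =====

-- B replaces A's four sequential str.replace passes by ONE left-to-right scan that looks
-- each keyword up at the current position (idiomatic single-pass substitution); return values proved equal.

-- ===== PORT A =====
-- A: for f in face.keys(): if f in txt: txt = txt.replace(f, face[f])
def emotifyFace : PySem.Dict String String :=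
  PySem.Dict.ofList [("smile", ":D"), ("grin", ":)"), ("sad", ":("), ("mad", ":P")]

def emotify (txt : String) : String :=
  emotifyFace.keys.foldl
    (fun t f => if PySem.Str.isIn f t then PySem.Str.replace t f ((emotifyFace.get? f).getD "") else t)
    txt

-- ===== PORT B =====
-- B: one pass over the characters; at each position try the four keywords in dict order,
-- emit the emoticon and skip the keyword on a hit, else emit the character. The Python
-- appends pieces to a list and joins them; the port concatenates the same pieces directly.
def emotifyScan (l : List Char) : List Char :=
  match l with
  | [] => []
  | c :: t =>
    if ['s','m','i','l','e'].isPrefixOf (c :: t) then ':' :: 'D' :: emotifyScan (t.drop 4)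
    else if ['g','r','i','n'].isPrefixOf (c :: t) then ':' :: ')' :: emotifyScan (t.drop 3)
    else if ['s','a','d'].isPrefixOf (c :: t) then ':' :: '(' :: emotifyScan (t.drop 2)
    else if ['m','a','d'].isPrefixOf (c :: t) then ':' :: 'P' :: emotifyScan (t.drop 2)
    else c :: emotifyScan t
  termination_by l.length
  decreasing_by all_goals (simp [List.length_drop]; try omega)

def emotify_alt (txt : String) : String := String.ofList (emotifyScan txt.toList)

-- ===== PRECONDITION & SPEC =====
def Spec_emotify (txt : String) (out : String) : Prop := out = emotify_alt txt
instance (txt : String) (out : String) : Decidable (Spec_emotify txt out) := by unfold Spec_emotify; infer_instance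

-- ===== CLAIM (what is proved, stated in full; the proofs are below) =====
def Claim_equal_emotify : Prop := ∀ (txt : String), Dom_emotify txt → Spec_emotify txt (emotify txt)

-- ===== LEMMAS AND PROOFS =====

-- clean recursive form of Python's str.replace (leftmost, non-overlapping)
def rep1 (old new : List Char) (l : List Char) : List Char :=
  match l with
  | [] => []
  | c :: t =>
    if old.isPrefixOf (c :: t) then new ++ rep1 old new (t.drop (old.length - 1))
    else c :: rep1 old new t
  termination_by l.length
  decreasing_by all_goals (simp [List.length_drop]; try omega)

theorem go_eq_rep1 (old new : List Char) (hold : old ≠ []) :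
    ∀ fuel l acc, l.length ≤ fuel →
      PySem.Chars.replace.go old new fuel l acc = acc.reverse ++ rep1 old new l := by
  intro fuel
  induction fuel with
  | zero =>
    intro l acc h
    have : l = [] := List.eq_nil_of_length_eq_zero (Nat.le_zero.mp h)
    subst this
    simp [PySem.Chars.replace.go, rep1]
  | succ n ih =>
    intro l acc h
    cases l with
    | nil => simp [PySem.Chars.replace.go, rep1]
    | cons c t =>
      rw [PySem.Chars.replace.go]
      by_cases hp : old.isPrefixOf (c :: t) = true
      · rw [if_pos hp]
        have hdrop : List.drop old.length (c :: t) = t.drop (old.length - 1) := by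
          cases old with
          | nil => exact absurd rfl hold
          | cons o os => simp
        rw [hdrop]
        have hlen : (t.drop (old.length - 1)).length ≤ n := by
          simp only [List.length_drop]
          have := Nat.le_of_succ_le_succ h
          omega
        rw [ih _ _ hlen, rep1, if_pos hp]
        simp
      · rw [if_neg hp]
        have hlen : t.length ≤ n := Nat.le_of_succ_le_succ h
        rw [ih _ _ hlen, rep1, if_neg hp]
        simp

theorem replace_eq_rep1 (s old new : List Char) (hold : old ≠ []) :
    PySem.Chars.replace s old new = rep1 old new s := by
  rw [PySem.Chars.replace, if_neg (by simp [List.isEmpty_iff, hold])]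
  simpa using go_eq_rep1 old new hold s.length s []

-- a no-occurrence replace is the identity
theorem rep1_id (old new : List Char) (l : List Char) (h : ¬ old <:+: l) :
    rep1 old new l = l := by
  induction l with
  | nil => simp [rep1]
  | cons c t ih =>
    rw [rep1, if_neg ?_, ih (fun hi => h (hi.trans (List.suffix_cons c t).isInfix))]
    intro hp
    exact h ((List.isPrefixOf_iff_prefix.mp hp).isInfix)

-- a prefix without ':' of a replaced string (replacement starting with ':') was already a prefix
theorem prefix_of_rep1 (old r w : List Char) (hw : ':' ∉ w) :
    ∀ t, w <+: rep1 old (':' :: r) t → w <+: t := by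
  intro t
  induction t generalizing w with
  | nil => simpa [rep1] using id
  | cons c t ih =>
    rw [rep1]
    split_ifs with hp
    · intro hpre
      cases w with
      | nil => exact List.nil_prefix
      | cons a w' =>
        rcases List.prefix_cons_iff.mp hpre with h0 | ⟨w2, heq, -⟩
        · exact absurd h0 (by simp)
        · injection heq with ha _
          exact absurd (ha ▸ List.mem_cons_self) hw
    · intro hpre
      cases w with
      | nil => exact List.nil_prefix
      | cons a w' =>
        rcases List.prefix_cons_iff.mp hpre with h0 | ⟨w2, heq, hw2⟩
        · exact absurd h0 (by simp)
        · injection heq with ha hweq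
          subst ha
          have hw2' : w' <+: rep1 old (':' :: r) t := hweq ▸ hw2
          have : w' <+: t := ih w' (fun m => hw (List.mem_cons_of_mem _ m)) hw2'
          exact List.prefix_cons_iff.mpr (Or.inr ⟨w', rfl, this⟩)

-- abbreviations for the four passes
def repSm (l : List Char) : List Char := rep1 ['s','m','i','l','e'] [':','D'] l
def repG (l : List Char) : List Char := rep1 ['g','r','i','n'] [':',')'] l
def repSa (l : List Char) : List Char := rep1 ['s','a','d'] [':','('] l
def repM (l : List Char) : List Char := rep1 ['m','a','d'] [':','P'] l

-- step lemma: a pass moves over a char that cannot start its keyword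
theorem rep1_step (old new : List Char) (c : Char) (t : List Char)
    (h : ¬ old.isPrefixOf (c :: t) = true) :
    rep1 old new (c :: t) = c :: rep1 old new t := by
  rw [rep1, if_neg h]

theorem main_lemma : ∀ n l, l.length ≤ n → repM (repSa (repG (repSm l))) = emotifyScan l := by
  intro n
  induction n with
  | zero =>
    intro l h
    have : l = [] := List.eq_nil_of_length_eq_zero (Nat.le_zero.mp h)
    subst this
    simp [repSm, repG, repSa, repM, rep1, emotifyScan]
  | succ n ih =>
    intro l h
    cases l with
    | nil => simp [repSm, repG, repSa, repM, rep1, emotifyScan]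
    | cons c t =>
      by_cases h1 : (['s','m','i','l','e'] : List Char).isPrefixOf (c :: t) = true
      · -- c :: t = smile ++ t'
        obtain ⟨t', ht⟩ := List.isPrefixOf_iff_prefix.mp h1
        have hlen : t'.length ≤ n := by
          have := congrArg List.length ht
          simp at this h; omega
        rw [← ht]
        simp only [List.cons_append, List.nil_append]
        have hsm : repSm ('s'::'m'::'i'::'l'::'e'::t') = ':' :: 'D' :: repSm t' := by
          rw [repSm, rep1, if_pos (by simp [List.isPrefixOf])]; rfl
        have hg : repG (':' :: 'D' :: repSm t') = ':' :: 'D' :: repG (repSm t') := by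
          rw [repG, rep1_step _ _ _ _ (by simp [List.isPrefixOf]), rep1_step _ _ _ _ (by simp [List.isPrefixOf])]; rfl
        have hsa : repSa (':' :: 'D' :: repG (repSm t')) = ':' :: 'D' :: repSa (repG (repSm t')) := by
          rw [repSa, rep1_step _ _ _ _ (by simp [List.isPrefixOf]), rep1_step _ _ _ _ (by simp [List.isPrefixOf])]; rfl
        have hm : repM (':' :: 'D' :: repSa (repG (repSm t'))) = ':' :: 'D' :: repM (repSa (repG (repSm t'))) := by
          rw [repM, rep1_step _ _ _ _ (by simp [List.isPrefixOf]), rep1_step _ _ _ _ (by simp [List.isPrefixOf])]; rfl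
        rw [hsm, hg, hsa, hm, ih t' hlen]
        rw [emotifyScan, if_pos (by simp [List.isPrefixOf])]; rfl
      · by_cases h2 : (['g','r','i','n'] : List Char).isPrefixOf (c :: t) = true
        · obtain ⟨t', ht⟩ := List.isPrefixOf_iff_prefix.mp h2
          have hlen : t'.length ≤ n := by
            have := congrArg List.length ht
            simp at this h; omega
          rw [← ht]
          simp only [List.cons_append, List.nil_append]
          have hsm : repSm ('g'::'r'::'i'::'n'::t') = 'g'::'r'::'i'::'n':: repSm t' := by
            rw [repSm, rep1_step _ _ _ _ (by simp [List.isPrefixOf]), rep1_step _ _ _ _ (by simp [List.isPrefixOf]),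
               rep1_step _ _ _ _ (by simp [List.isPrefixOf]), rep1_step _ _ _ _ (by simp [List.isPrefixOf])]; rfl
          have hg : repG ('g'::'r'::'i'::'n':: repSm t') = ':' :: ')' :: repG (repSm t') := by
            rw [repG, rep1, if_pos (by simp [List.isPrefixOf])]; rfl
          have hsa : repSa (':' :: ')' :: repG (repSm t')) = ':' :: ')' :: repSa (repG (repSm t')) := by
            rw [repSa, rep1_step _ _ _ _ (by simp [List.isPrefixOf]), rep1_step _ _ _ _ (by simp [List.isPrefixOf])]; rfl
          have hm : repM (':' :: ')' :: repSa (repG (repSm t'))) = ':' :: ')' :: repM (repSa (repG (repSm t'))) := by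
            rw [repM, rep1_step _ _ _ _ (by simp [List.isPrefixOf]), rep1_step _ _ _ _ (by simp [List.isPrefixOf])]; rfl
          rw [hsm, hg, hsa, hm, ih t' hlen]
          rw [emotifyScan, if_neg (by simp [List.isPrefixOf]), if_pos (by simp [List.isPrefixOf])]; rfl
        · by_cases h3 : (['s','a','d'] : List Char).isPrefixOf (c :: t) = true
          · obtain ⟨t', ht⟩ := List.isPrefixOf_iff_prefix.mp h3
            have hlen : t'.length ≤ n := by
              have := congrArg List.length ht
              simp at this h; omega
            rw [← ht]
            simp only [List.cons_append, List.nil_append]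
            have hsm : repSm ('s'::'a'::'d'::t') = 's'::'a'::'d':: repSm t' := by
              rw [repSm, rep1_step _ _ _ _ (by simp [List.isPrefixOf]), rep1_step _ _ _ _ (by simp [List.isPrefixOf]),
                 rep1_step _ _ _ _ (by simp [List.isPrefixOf])]; rfl
            have hg : repG ('s'::'a'::'d':: repSm t') = 's'::'a'::'d':: repG (repSm t') := by
              rw [repG, rep1_step _ _ _ _ (by simp [List.isPrefixOf]), rep1_step _ _ _ _ (by simp [List.isPrefixOf]),
                 rep1_step _ _ _ _ (by simp [List.isPrefixOf])]; rfl
            have hsa : repSa ('s'::'a'::'d':: repG (repSm t')) = ':' :: '(' :: repSa (repG (repSm t')) := by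
              rw [repSa, rep1, if_pos (by simp [List.isPrefixOf])]; rfl
            have hm : repM (':' :: '(' :: repSa (repG (repSm t'))) = ':' :: '(' :: repM (repSa (repG (repSm t'))) := by
              rw [repM, rep1_step _ _ _ _ (by simp [List.isPrefixOf]), rep1_step _ _ _ _ (by simp [List.isPrefixOf])]; rfl
            rw [hsm, hg, hsa, hm, ih t' hlen]
            rw [emotifyScan, if_neg (by simp [List.isPrefixOf]), if_neg (by simp [List.isPrefixOf]),
               if_pos (by simp [List.isPrefixOf])]; rfl
          · by_cases h4 : (['m','a','d'] : List Char).isPrefixOf (c :: t) = true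
            · obtain ⟨t', ht⟩ := List.isPrefixOf_iff_prefix.mp h4
              have hlen : t'.length ≤ n := by
                have := congrArg List.length ht
                simp at this h; omega
              rw [← ht]
              simp only [List.cons_append, List.nil_append]
              have hsm : repSm ('m'::'a'::'d'::t') = 'm'::'a'::'d':: repSm t' := by
                rw [repSm, rep1_step _ _ _ _ (by simp [List.isPrefixOf]), rep1_step _ _ _ _ (by simp [List.isPrefixOf]),
                   rep1_step _ _ _ _ (by simp [List.isPrefixOf])]; rfl
              have hg : repG ('m'::'a'::'d':: repSm t') = 'm'::'a'::'d':: repG (repSm t') := by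
                rw [repG, rep1_step _ _ _ _ (by simp [List.isPrefixOf]), rep1_step _ _ _ _ (by simp [List.isPrefixOf]),
                   rep1_step _ _ _ _ (by simp [List.isPrefixOf])]; rfl
              have hsa : repSa ('m'::'a'::'d':: repG (repSm t')) = 'm'::'a'::'d':: repSa (repG (repSm t')) := by
                rw [repSa, rep1_step _ _ _ _ (by simp [List.isPrefixOf]), rep1_step _ _ _ _ (by simp [List.isPrefixOf]),
                   rep1_step _ _ _ _ (by simp [List.isPrefixOf])]; rfl
              have hm : repM ('m'::'a'::'d':: repSa (repG (repSm t'))) = ':' :: 'P' :: repM (repSa (repG (repSm t'))) := by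
                rw [repM, rep1, if_pos (by simp [List.isPrefixOf])]; rfl
              rw [hsm, hg, hsa, hm, ih t' hlen]
              rw [emotifyScan, if_neg (by simp [List.isPrefixOf]), if_neg (by simp [List.isPrefixOf]),
                 if_neg (by simp [List.isPrefixOf]), if_pos (by simp [List.isPrefixOf])]; rfl
            · -- no keyword starts here
              have hsm : repSm (c :: t) = c :: repSm t := rep1_step _ _ _ _ h1
              have hg : repG (c :: repSm t) = c :: repG (repSm t) := by
                apply rep1_step
                intro hp
                simp only [List.isPrefixOf, Bool.and_eq_true, beq_iff_eq] at hp
                obtain ⟨hc, hp'⟩ := hp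
                have hpt : (['r','i','n'] : List Char) <+: t :=
                  prefix_of_rep1 _ _ _ (by decide) t (List.isPrefixOf_iff_prefix.mp hp')
                subst hc
                exact h2 (by simpa [List.isPrefixOf] using List.isPrefixOf_iff_prefix.mpr hpt)
              have hsa : repSa (c :: repG (repSm t)) = c :: repSa (repG (repSm t)) := by
                apply rep1_step
                intro hp
                simp only [List.isPrefixOf, Bool.and_eq_true, beq_iff_eq] at hp
                obtain ⟨hc, hp'⟩ := hp
                have hpt : (['a','d'] : List Char) <+: t :=
                  prefix_of_rep1 _ _ _ (by decide) t
                    (prefix_of_rep1 _ _ _ (by decide) (repSm t)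
                      (List.isPrefixOf_iff_prefix.mp hp'))
                subst hc
                exact h3 (by simpa [List.isPrefixOf] using List.isPrefixOf_iff_prefix.mpr hpt)
              have hm : repM (c :: repSa (repG (repSm t))) = c :: repM (repSa (repG (repSm t))) := by
                apply rep1_step
                intro hp
                simp only [List.isPrefixOf, Bool.and_eq_true, beq_iff_eq] at hp
                obtain ⟨hc, hp'⟩ := hp
                have hpt : (['a','d'] : List Char) <+: t :=
                  prefix_of_rep1 _ _ _ (by decide) t
                    (prefix_of_rep1 _ _ _ (by decide) (repSm t)
                      (prefix_of_rep1 _ _ _ (by decide) (repG (repSm t))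
                        (List.isPrefixOf_iff_prefix.mp hp')))
                subst hc
                exact h4 (by simpa [List.isPrefixOf] using List.isPrefixOf_iff_prefix.mpr hpt)
              rw [hsm, hg, hsa, hm, ih t (by simp at h; omega)]
              rw [emotifyScan, if_neg h1, if_neg h2, if_neg h3, if_neg h4]

-- one guarded pass of A, as a named function
def stepF (f e t : String) : String :=
  if PySem.Str.isIn f t then PySem.Str.replace t f e else t

theorem stepF_toList (f e : String) (hf : f.toList ≠ []) (t : String) :
    (stepF f e t).toList = rep1 f.toList e.toList t.toList := by
  unfold stepF
  by_cases h : PySem.Str.isIn f t = true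
  · rw [if_pos h, PySem.Str.toList_replace, replace_eq_rep1 _ _ _ hf]
  · rw [if_neg h, rep1_id]
    rw [PySem.Str.isIn_eq] at h
    exact fun hi => h ((PySem.Chars.isIn_iff_infix _ _).mpr hi)

theorem emotify_eq_steps (txt : String) :
    emotify txt = stepF "mad" ":P" (stepF "sad" ":(" (stepF "grin" ":)" (stepF "smile" ":D" txt))) := by
  unfold emotify
  rw [show emotifyFace.keys = ["smile","grin","sad","mad"] from by decide]
  simp only [List.foldl]
  rw [show ((emotifyFace.get? "smile").getD "") = ":D" from by decide,
     show ((emotifyFace.get? "grin").getD "") = ":)" from by decide,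
     show ((emotifyFace.get? "sad").getD "") = ":(" from by decide,
     show ((emotifyFace.get? "mad").getD "") = ":P" from by decide]
  rfl

-- ===== VERDICT (by name: the statement is the Claim_ definition above) =====
theorem emotify_spec : Claim_equal_emotify := by
  unfold Claim_equal_emotify
  intro txt _
  unfold Spec_emotify emotify_alt
  have hlist : (emotify txt).toList = emotifyScan txt.toList := by
    rw [emotify_eq_steps, stepF_toList _ _ (by decide), stepF_toList _ _ (by decide),
      stepF_toList _ _ (by decide), stepF_toList _ _ (by decide)]
    exact main_lemma txt.toList.length txt.toList le_rfl
  calc emotify txt = String.ofList (emotify txt).toList := String.ofList_toList.symm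
    _ = String.ofList (emotifyScan txt.toList) := by rw [hlist]
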